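-- pv_equiv track=rewrite | github.com/prakHr/ProjectEuler-V-2.0 | ProjectEuler.py | countIncenterCase
-- ===== SOURCE A (Python) =====
-- def countIncenterCase(bound):
--     res=0
--     stack=[(0,1,1,1)]
--     while stack:#(b-a)/(sqrt(2)x)=(sqrt(2)y/(d-c))=>(b-a)(d-c)=(2xy)
--         a,b,c,d=stack.pop()#(a-b)(a-d)=2(a(a-x))
--         n=a+c#-ad-ab+bd=aa-2ax
--         m=b+d#Alternative solution @https://projecteuler.net/thread=299;page=3
--         legsLength=m*m-n*n+2*m*n#2 cases x=a/2,b=d and b!=d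
--         if legsLength>=bound:
--             continue
--         if (m-n)%2!=0:
--             res+=((bound-1)//legsLength)*2
--         stack.append((a,b,n,m))
--         stack.append((n,m,c,d))
--     return res
--
-- def L(a,b):
--     c=int((a*a+4*b)**.5)#https://projecteuler.net/thread=403;page=2#last
--     return int((c**3+5*c+6)/6)
--
-- A='''1415926535897932384626433832795028841971693993751058209749445923078164062862089986280348253421170679'''
--
-- B='''8214808651328230664709384460955058223172535940812848111745028410270193852110555964462294895493038196'''
--
-- fibonacci=[]
--
-- def getWhichWord(n):
--         n0=n-1
--         for i in range(len(fibonacci)):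
--                 if fibonacci[i]*L>n0:
--                         return i
--         return -1
--
-- def getDigit(n,whichWord):
--         n0=n-1
--         if whichWord==0:
--                 return A[n0]
--         if whichWord==1:
--                 return B[n0]
--         offset=(fibonacci[whichWord-2])*L
--         if n0<offset:
--                 return getDigit(n,whichWord-2)
--         else:return getDigit(n-offset,whichWord-1)
--         return -1
--
-- def d(n):
--         return getDigit(n,getWhichWord(n))
--
-- res=[]
-- ===== SOURCE B (Python) =====
-- def _gcd(x, y):
--     while y:
--         x, y = y, x % y
--     return x
--
-- def countIncenterCase(bound):
--     # The Stern-Brocot tree between 0/1 and 1/1 enumerates exactly the reduced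
--     # fractions n/m in lowest terms between those bounds, and legsLength grows down
--     # the tree, so the pruned traversal visits exactly the coprime pairs (n, m),
--     # n below m, whose legsLength lies under the bound:
--     # enumerate them directly (O(1) memory instead of a stack/tree).
--     res = 0
--     m = 2
--     while (m + 1) * (m + 1) - 2 < bound:  # minimal legsLength in row m (at n=1)
--         for n in range(1, m):
--             legsLength = m * m - n * n + 2 * m * n
--             if legsLength < bound and (m - n) % 2 != 0 and _gcd(n, m) == 1:
--                 res += ((bound - 1) // legsLength) * 2
--         m += 1
--     return res
-- ===== Notes on version B (the rewrite author's own statement) =====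
-- stated objective: alternative
-- what changed: Replaces A's stack-based pruned traversal of the Stern-Brocot tree by a direct double loop enumerating the coprime pairs (n, m), n below m both positive, with legsLength < bound (the exact set of nodes the pruned tree visits), using a hand-written Euclid gcd; this needs O(1) memory instead of A's stack.
import Mathlib
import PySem

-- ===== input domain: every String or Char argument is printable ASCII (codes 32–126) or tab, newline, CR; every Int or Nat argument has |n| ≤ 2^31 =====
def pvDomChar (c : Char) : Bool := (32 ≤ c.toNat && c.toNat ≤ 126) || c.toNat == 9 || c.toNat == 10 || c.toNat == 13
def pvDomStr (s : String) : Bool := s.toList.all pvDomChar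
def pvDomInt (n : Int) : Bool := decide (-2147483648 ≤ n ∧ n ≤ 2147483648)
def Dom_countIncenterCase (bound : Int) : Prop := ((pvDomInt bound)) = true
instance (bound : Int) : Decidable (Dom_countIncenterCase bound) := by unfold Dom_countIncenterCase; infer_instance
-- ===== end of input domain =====

-- B replaces A's stack-based traversal of the Stern–Brocot tree by a direct double loop
-- over the coprime pairs (n, m) with 1 ≤ n < m with legsLength < bound — exactly the pairs
-- the pruned tree visits — in O(1) memory (objective: alternative).

-- Termination infrastructure shared by the two ports (cited in their `decreasing_by`):
-- every node on the stack/frontier satisfies the invariant 0 ≤ a < b, 0 < c ≤ d, and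
-- the node value  legsLength = m*m - n*n + 2*m*n  (n = a+c, m = b+d) strictly grows
-- from a node to each of its two children; recursion stops once it reaches `bound`.

def pvInv (p : Int × Int × Int × Int) : Prop :=
  0 ≤ p.1 ∧ p.1 < p.2.1 ∧ 0 < p.2.2.1 ∧ p.2.2.1 ≤ p.2.2.2

def pvLegs (p : Int × Int × Int × Int) : Int :=
  (p.2.1 + p.2.2.2) * (p.2.1 + p.2.2.2) - (p.1 + p.2.2.1) * (p.1 + p.2.2.1)
    + 2 * (p.2.1 + p.2.2.2) * (p.1 + p.2.2.1)

theorem pvInv_c1 {a b c d : Int} (h : pvInv (a, b, c, d)) :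
    pvInv (a, b, a + c, b + d) := by
  simp only [pvInv] at h ⊢
  omega

theorem pvInv_c2 {a b c d : Int} (h : pvInv (a, b, c, d)) :
    pvInv (a + c, b + d, c, d) := by
  simp only [pvInv] at h ⊢
  omega

theorem pvLegs_c1 {a b c d : Int} (h : pvInv (a, b, c, d)) :
    pvLegs (a, b, c, d) < pvLegs (a, b, a + c, b + d) := by
  simp only [pvInv] at h
  obtain ⟨h1, h2, h3, h4⟩ := h
  simp only [pvLegs]
  nlinarith

theorem pvLegs_c2 {a b c d : Int} (h : pvInv (a, b, c, d)) :
    pvLegs (a, b, c, d) < pvLegs (a + c, b + d, c, d) := by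
  simp only [pvInv] at h
  obtain ⟨h1, h2, h3, h4⟩ := h
  simp only [pvLegs]
  nlinarith

def pvS := {p : Int × Int × Int × Int // pvInv p}

def pvW (bound : Int) (q : pvS) : Nat := (bound - pvLegs q.1).toNat

theorem pvPow_lt {w1 w2 w : Nat} (h1 : w1 < w) (h2 : w2 < w) :
    3 ^ w1 + 3 ^ w2 < 3 ^ w := by
  have e1 : 3 ^ w1 ≤ 3 ^ (w - 1) := Nat.pow_le_pow_right (by norm_num) (by omega)
  have e2 : 3 ^ w2 ≤ 3 ^ (w - 1) := Nat.pow_le_pow_right (by norm_num) (by omega)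
  have e3 : 3 ^ w = 3 * 3 ^ (w - 1) := by
    rw [← pow_succ']
    congr 1
    omega
  have e4 : 0 < 3 ^ (w - 1) := Nat.pow_pos (by norm_num)
  omega

theorem pvW_child_lt {bound : Int} {p q : Int × Int × Int × Int}
    (hb : ¬ pvLegs p ≥ bound) (hlt : pvLegs p < pvLegs q) :
    (bound - pvLegs q).toNat < (bound - pvLegs p).toNat := by
  omega

-- ===== PORT A =====
-- A's DFS loop: pop from the stack top, prune if legsLength ≥ bound, otherwise add the
-- contribution and push the two children (the second-pushed child is popped first,
-- matching Python's list.pop()).  n = a + c, m = b + d, legsLength = m*m - n*n + 2*m*n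
-- are inlined.
def loopA (bound : Int) (stack : List pvS) (res : Int) : Int :=
  match stack with
  | [] => res
  | ⟨(a, b, c, d), h⟩ :: rest =>
    if hgt : (b + d) * (b + d) - (a + c) * (a + c) + 2 * (b + d) * (a + c) ≥ bound then
      loopA bound rest res
    else
      loopA bound (⟨(a + c, b + d, c, d), pvInv_c2 h⟩ :: ⟨(a, b, a + c, b + d), pvInv_c1 h⟩ :: rest)
        (if PySem.Int.mod (b + d - (a + c)) 2 ≠ 0 then
          res + PySem.Int.floordiv (bound - 1)
            ((b + d) * (b + d) - (a + c) * (a + c) + 2 * (b + d) * (a + c)) * 2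
        else res)
termination_by (stack.map fun q => 3 ^ pvW bound q).sum
decreasing_by
  · simp only [List.map_cons, List.sum_cons]
    have h0 : 0 < 3 ^ pvW bound (⟨(a, b, c, d), h⟩ : pvS) := Nat.pow_pos (by norm_num)
    omega
  · simp only [List.map_cons, List.sum_cons]
    have h1 : pvW bound (⟨(a, b, a + c, b + d), pvInv_c1 h⟩ : pvS) < pvW bound ⟨(a, b, c, d), h⟩ :=
      pvW_child_lt (by exact hgt) (pvLegs_c1 h)
    have h2 : pvW bound (⟨(a + c, b + d, c, d), pvInv_c2 h⟩ : pvS) < pvW bound ⟨(a, b, c, d), h⟩ :=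
      pvW_child_lt (by exact hgt) (pvLegs_c2 h)
    have h3 : 3 ^ pvW bound (⟨(a + c, b + d, c, d), pvInv_c2 h⟩ : pvS)
        + 3 ^ pvW bound (⟨(a, b, a + c, b + d), pvInv_c1 h⟩ : pvS)
        < 3 ^ pvW bound (⟨(a, b, c, d), h⟩ : pvS) := pvPow_lt h2 h1
    omega

theorem pvInv_root : pvInv (0, 1, 1, 1) := by
  simp only [pvInv]
  norm_num

def countIncenterCase (bound : Int) : Int :=
  loopA bound [⟨(0, 1, 1, 1), pvInv_root⟩] 0

-- ===== PORT B =====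
-- B's helper _gcd: Euclid's algorithm with Python's % (PySem.Int.mod).
theorem pvModAbs (x y : Int) (hy : ¬ y = 0) : (PySem.Int.mod x y).natAbs < y.natAbs := by
  rcases lt_trichotomy y 0 with h | h | h
  · have := PySem.Int.mod_neg_bounds x h
    omega
  · exact absurd h hy
  · have h1 := PySem.Int.mod_nonneg x h
    have h2 := PySem.Int.mod_lt x h
    omega

def gcdB (x y : Int) : Int :=
  if hy : y = 0 then x else gcdB y (PySem.Int.mod x y)
termination_by y.natAbs
decreasing_by exact pvModAbs x y hy

-- the inner `for n in range(1, m):` loop of B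
def innerB (bound m res : Int) : Int :=
  (PySem.List.pyRange 1 m 1).foldl
    (fun r n =>
      if m * m - n * n + 2 * m * n < bound ∧ PySem.Int.mod (m - n) 2 ≠ 0 ∧ gcdB n m = 1 then
        r + PySem.Int.floordiv (bound - 1) (m * m - n * n + 2 * m * n) * 2
      else r) res

-- the outer `while (m + 1) * (m + 1) - 2 < bound:` loop of B
def outerB (bound m res : Int) : Int :=
  if h : (m + 1) * (m + 1) - 2 < bound then outerB bound (m + 1) (innerB bound m res)
  else res
termination_by ((-m).toNat, (bound + 2 - (m + 1) * (m + 1)).toNat)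
decreasing_by
  rw [Prod.lex_iff]
  have key : (m + 1 + 1) * (m + 1 + 1) = (m + 1) * (m + 1) + 2 * m + 3 := by ring
  omega

def countIncenterCase_alt (bound : Int) : Int :=
  outerB bound 2 0

-- ===== PRECONDITION & SPEC =====
def Spec_countIncenterCase (bound : Int) (out : Int) : Prop := out = countIncenterCase_alt bound
instance (bound : Int) (out : Int) : Decidable (Spec_countIncenterCase bound out) := by unfold Spec_countIncenterCase; infer_instance

-- ===== CLAIM (what is proved, stated in full; the proofs are below) =====
def Claim_equal_countIncenterCase : Prop := ∀ (bound : Int), Dom_countIncenterCase bound → Spec_countIncenterCase bound (countIncenterCase bound)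

-- ===== LEMMAS AND PROOFS =====

-- The order-independent value of one subtree; both traversals accumulate it.
def visitT (bound : Int) (q : pvS) : Int :=
  match q with
  | ⟨(a, b, c, d), h⟩ =>
    if hgt : (b + d) * (b + d) - (a + c) * (a + c) + 2 * (b + d) * (a + c) ≥ bound then 0
    else
      (if PySem.Int.mod (b + d - (a + c)) 2 ≠ 0 then
        PySem.Int.floordiv (bound - 1)
          ((b + d) * (b + d) - (a + c) * (a + c) + 2 * (b + d) * (a + c)) * 2
      else 0)
        + visitT bound ⟨(a, b, a + c, b + d), pvInv_c1 h⟩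
        + visitT bound ⟨(a + c, b + d, c, d), pvInv_c2 h⟩
termination_by pvW bound q
decreasing_by
  · exact pvW_child_lt (by exact hgt) (pvLegs_c1 h)
  · exact pvW_child_lt (by exact hgt) (pvLegs_c2 h)

theorem visitT_stop (bound a b c d : Int) (h : pvInv (a, b, c, d))
    (hgt : (b + d) * (b + d) - (a + c) * (a + c) + 2 * (b + d) * (a + c) ≥ bound) :
    visitT bound ⟨(a, b, c, d), h⟩ = 0 := by
  rw [visitT.eq_def]
  simp only [dif_pos hgt]

theorem visitT_go (bound a b c d : Int) (h : pvInv (a, b, c, d))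
    (hgt : ¬ (b + d) * (b + d) - (a + c) * (a + c) + 2 * (b + d) * (a + c) ≥ bound) :
    visitT bound ⟨(a, b, c, d), h⟩ =
      (if PySem.Int.mod (b + d - (a + c)) 2 ≠ 0 then
        PySem.Int.floordiv (bound - 1)
          ((b + d) * (b + d) - (a + c) * (a + c) + 2 * (b + d) * (a + c)) * 2
      else 0)
        + visitT bound ⟨(a, b, a + c, b + d), pvInv_c1 h⟩
        + visitT bound ⟨(a + c, b + d, c, d), pvInv_c2 h⟩ := by
  rw [visitT.eq_def]
  simp only [dif_neg hgt]

theorem loopA_eq (bound : Int) (stack : List pvS) (res : Int) :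
    loopA bound stack res = res + (stack.map (visitT bound)).sum := by
  fun_induction loopA bound stack res with
  | case1 res => simp
  | case2 res a b c d h rest hgt ih =>
    rw [ih]
    simp only [List.map_cons, List.sum_cons]
    rw [visitT_stop bound a b c d h hgt]
    ring
  | case3 res a b c d h rest hgt ih =>
    simp only [dite_eq_ite] at ih
    rw [ih]
    simp only [List.map_cons, List.sum_cons]
    rw [visitT_go bound a b c d h hgt]
    split <;> ring

-- ---- gcd bridge: gcdB is Euclid's algorithm, i.e. Int.gcd on nonnegative inputs ----

theorem pvGcd_step (x y : Int) : Int.gcd x y = Int.gcd y (x % y) := by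
  apply Nat.dvd_antisymm
  · apply Int.dvd_gcd
    · exact Int.gcd_dvd_right x y
    · have h1 : (↑(Int.gcd x y) : Int) ∣ x := Int.gcd_dvd_left x y
      have h2 : (↑(Int.gcd x y) : Int) ∣ y := Int.gcd_dvd_right x y
      have h3 : x % y = x - y * (x / y) := by rw [Int.emod_def]
      rw [h3]
      exact dvd_sub h1 (Dvd.dvd.mul_right h2 _)
  · apply Int.dvd_gcd
    · have h1 : (↑(Int.gcd y (x % y)) : Int) ∣ x % y + y * (x / y) :=
        dvd_add (Int.gcd_dvd_right y (x % y)) (Dvd.dvd.mul_right (Int.gcd_dvd_left y (x % y)) _)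
      rwa [Int.emod_add_ediv] at h1
    · exact Int.gcd_dvd_left y (x % y)

theorem gcdB_eq : ∀ (k : ℕ) (x y : Int), y.natAbs = k → 0 ≤ x → 0 ≤ y →
    gcdB x y = (Int.gcd x y : Int) := by
  intro k
  induction k using Nat.strong_induction_on with
  | _ k IH =>
    intro x y hk hx hy
    rw [gcdB]
    by_cases h0 : y = 0
    · simp only [h0, dif_pos]
      subst h0
      rw [Int.gcd_zero_right, Int.natAbs_of_nonneg hx]
    · have hypos : 0 < y := lt_of_le_of_ne hy (Ne.symm h0)
      rw [dif_neg h0]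
      have hmod : PySem.Int.mod x y = x % y := PySem.Int.mod_eq_emod_of_pos hypos
      have habs := pvModAbs x y h0
      have hrec := IH (PySem.Int.mod x y).natAbs (by omega) y (PySem.Int.mod x y) rfl hy
        (by rw [hmod]; exact Int.emod_nonneg x h0)
      rw [hrec, hmod, ← pvGcd_step]

-- ---- the pair sets both sides sum over ----

def pvLegs2 (n m : Int) : Int := m * m - n * n + 2 * m * n

def pvF (bound : Int) (p : ℤ × ℤ) : Int :=
  if PySem.Int.mod (p.2 - p.1) 2 ≠ 0 then
    PySem.Int.floordiv (bound - 1) (pvLegs2 p.1 p.2) * 2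
  else 0

-- reduced fractions strictly between a/b and c/d whose legsLength is below bound
noncomputable def pvSet (bound a b c d : Int) : Finset (ℤ × ℤ) :=
  (Finset.Icc 1 bound ×ˢ Finset.Icc 1 bound).filter
    (fun p => a * p.2 < p.1 * b ∧ p.1 * d < c * p.2 ∧ Int.gcd p.1 p.2 = 1 ∧ pvLegs2 p.1 p.2 < bound)

-- reduced fractions 0 < n/m < 1 with denominator ≥ m and legsLength below bound
noncomputable def pvTail (bound m : Int) : Finset (ℤ × ℤ) :=
  (Finset.Icc 1 bound ×ˢ Finset.Icc m bound).filter
    (fun p => 1 ≤ p.1 ∧ p.1 < p.2 ∧ Int.gcd p.1 p.2 = 1 ∧ pvLegs2 p.1 p.2 < bound)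

-- ---- arithmetic facts about the Stern–Brocot interval (a/b, c/d) ----

-- any fraction n/m strictly inside the interval has n ≥ a+c and m ≥ b+d
theorem pvPair_ge {a b c d n m : Int} (h : pvInv (a, b, c, d)) (hdet : b * c - a * d = 1)
    (hn : 1 ≤ n) (hm : 1 ≤ m) (h1 : a * m < n * b) (h2 : n * d < c * m) :
    a + c ≤ n ∧ b + d ≤ m := by
  simp only [pvInv] at h
  obtain ⟨ha, hab, hc, hcd⟩ := h
  have hu : 1 ≤ n * b - a * m := by omega
  have hv : 1 ≤ c * m - n * d := by omega
  have en : n = c * (n * b - a * m) + a * (c * m - n * d) := by linear_combination (-n) * hdet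
  have em : m = b * (c * m - n * d) + d * (n * b - a * m) := by linear_combination (-m) * hdet
  have e1 : c * 1 ≤ c * (n * b - a * m) := by
    exact mul_le_mul_of_nonneg_left hu (by omega)
  have e2 : a * 1 ≤ a * (c * m - n * d) := by
    exact mul_le_mul_of_nonneg_left hv ha
  have e3 : b * 1 ≤ b * (c * m - n * d) := by
    exact mul_le_mul_of_nonneg_left hv (by omega)
  have e4 : d * 1 ≤ d * (n * b - a * m) := by
    exact mul_le_mul_of_nonneg_left hu (by omega)
  omega

theorem pvLegs2_mono {n0 m0 n m : Int} (h0 : 0 < n0) (h1 : n0 < m0)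
    (hn : n0 ≤ n) (hm : m0 ≤ m) (hnm : n < m) :
    pvLegs2 n0 m0 ≤ pvLegs2 n m := by
  simp only [pvLegs2]
  nlinarith [mul_nonneg (sub_nonneg.2 hn) (sub_nonneg.2 hm), sq_nonneg (m - m0),
    sq_nonneg (n - n0), mul_nonneg (sub_nonneg.2 hm) (sub_nonneg.2 hm)]

-- legsLength of any row-m entry is at least (m+1)^2 - 2
theorem pvLegs2_row_ge {n m : Int} (hn : 1 ≤ n) (hnm : n < m) :
    (m + 1) * (m + 1) - 2 ≤ pvLegs2 n m := by
  simp only [pvLegs2]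
  nlinarith [mul_nonneg (sub_nonneg.2 hn) (by omega : (0:ℤ) ≤ 2 * m - n - 1)]

-- legsLength of the mediant dominates m0^2
theorem pvLegs2_gt_sq {n0 m0 : Int} (h0 : 0 < n0) (h1 : n0 < m0) :
    m0 * m0 < pvLegs2 n0 m0 := by
  simp only [pvLegs2]
  nlinarith

-- two reduced fractions with equal cross products are equal
theorem pvCross_eq {n m n0 m0 : Int} (hm : 0 < m) (hm0 : 0 < m0)
    (hg : Int.gcd n m = 1) (hg0 : Int.gcd n0 m0 = 1) (he : n * m0 = n0 * m) :
    n = n0 ∧ m = m0 := by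
  have hc : IsCoprime n m := Int.isCoprime_iff_gcd_eq_one.mpr hg
  have hc0 : IsCoprime n0 m0 := Int.isCoprime_iff_gcd_eq_one.mpr hg0
  have d1 : m ∣ m0 := hc.symm.dvd_of_dvd_mul_right (⟨n0, by linarith⟩ : m ∣ m0 * n)
  have d2 : m0 ∣ m := hc0.symm.dvd_of_dvd_mul_right (⟨n, by linarith⟩ : m0 ∣ m * n0)
  have hmm : m = m0 := Int.dvd_antisymm (by omega) (by omega) d1 d2
  constructor
  · have : n * m0 = n0 * m0 := by rw [he, hmm]
    exact mul_right_cancel₀ (by omega) this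
  · exact hmm

-- the mediant of a determinant-1 interval is reduced
theorem pvGcd_mediant {a b c d : Int} (hdet : b * c - a * d = 1) :
    Int.gcd (a + c) (b + d) = 1 := by
  apply Int.isCoprime_iff_gcd_eq_one.mp
  exact ⟨b, -a, by linear_combination hdet⟩

-- ---- tree side: visitT sums pvF over pvSet ----

-- transitivity of fractions via cross products: n1/d1 < n2/d2 < n3/d3 → n1/d1 < n3/d3
theorem pvFracTrans {n1 d1 n2 d2 n3 d3 : ℤ} (hd1 : 0 < d1) (hd2 : 0 < d2) (hd3 : 0 < d3)
    (hA : n1 * d2 < n2 * d1) (hB : n2 * d3 < n3 * d2) : n1 * d3 < n3 * d1 := by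
  have hid : d2 * (n3 * d1 - n1 * d3) = d1 * (n3 * d2 - n2 * d3) + d3 * (n2 * d1 - n1 * d2) := by
    ring
  nlinarith [hid, mul_le_mul_of_nonneg_left (by omega : (1:ℤ) ≤ n3 * d2 - n2 * d3) (by omega : (0:ℤ) ≤ d1),
    mul_le_mul_of_nonneg_left (by omega : (1:ℤ) ≤ n2 * d1 - n1 * d2) (by omega : (0:ℤ) ≤ d3)]

theorem visitT_sum (bound : Int) : ∀ (k : ℕ) (a b c d : Int) (h : pvInv (a, b, c, d)),
    (bound - pvLegs (a, b, c, d)).toNat = k → b * c - a * d = 1 →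
    visitT bound ⟨(a, b, c, d), h⟩ = (pvSet bound a b c d).sum (pvF bound) := by
  intro k
  induction k using Nat.strong_induction_on with
  | _ k IH =>
    intro a b c d h hk hdet
    have hinv := h
    simp only [pvInv] at hinv
    obtain ⟨ha, hab, hc, hcd⟩ := hinv
    have hplegs : pvLegs (a, b, c, d)
        = (b + d) * (b + d) - (a + c) * (a + c) + 2 * (b + d) * (a + c) := by
      simp only [pvLegs]
    by_cases hgt : (b + d) * (b + d) - (a + c) * (a + c) + 2 * (b + d) * (a + c) ≥ bound
    · rw [visitT_stop bound a b c d h hgt]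
      have hempty : pvSet bound a b c d = ∅ := by
        ext p
        obtain ⟨n, m⟩ := p
        simp only [pvSet, Finset.mem_filter, Finset.mem_product, Finset.mem_Icc,
          Finset.notMem_empty, iff_false]
        rintro ⟨⟨⟨hn1, hn2⟩, hm1, hm2⟩, h1, h2, h3, h4⟩
        have hge := pvPair_ge h hdet hn1 hm1 h1 h2
        have hnm : n < m := by nlinarith [mul_le_mul_of_nonneg_right hcd (by omega : (0:ℤ) ≤ m)]
        have hmono := pvLegs2_mono (show 0 < a + c by omega) (show a + c < b + d by omega)
          hge.1 hge.2 hnm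
        simp only [pvLegs2] at hmono h4
        omega
      rw [hempty, Finset.sum_empty]
    · rw [visitT_go bound a b c d h hgt]
      -- mediant facts
      have hmed1 : a * (b + d) < (a + c) * b := by nlinarith [hdet]
      have hmed2 : (a + c) * d < c * (b + d) := by nlinarith [hdet]
      have hmedg : Int.gcd (a + c) (b + d) = 1 := pvGcd_mediant hdet
      have hmedlegs : pvLegs2 (a + c) (b + d) < bound := by simp only [pvLegs2]; omega
      have hmedsq := pvLegs2_gt_sq (show 0 < a + c by omega) (show a + c < b + d by omega)
      have hbd_le : b + d ≤ bound := by
        simp only [pvLegs2] at hmedlegs hmedsq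
        nlinarith [mul_le_mul_of_nonneg_left (show (1:ℤ) ≤ b + d by omega)
          (show (0:ℤ) ≤ b + d by omega)]
      -- children determinants and measures
      have hdet1 : b * (a + c) - a * (b + d) = 1 := by linear_combination hdet
      have hdet2 : (b + d) * c - (a + c) * d = 1 := by linear_combination hdet
      have hml1 := pvLegs_c1 h
      have hml2 := pvLegs_c2 h
      rw [IH (bound - pvLegs (a, b, a + c, b + d)).toNat (by omega)
        a b (a + c) (b + d) (pvInv_c1 h) rfl hdet1]
      rw [IH (bound - pvLegs (a + c, b + d, c, d)).toNat (by omega)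
        (a + c) (b + d) c d (pvInv_c2 h) rfl hdet2]
      -- split the parent set
      have hsplit : pvSet bound a b c d
          = insert ((a + c), (b + d))
              (pvSet bound a b (a + c) (b + d) ∪ pvSet bound (a + c) (b + d) c d) := by
        ext p
        obtain ⟨n, m⟩ := p
        simp only [pvSet, Finset.mem_insert, Finset.mem_union, Finset.mem_filter,
          Finset.mem_product, Finset.mem_Icc, Prod.mk.injEq]
        constructor
        · rintro ⟨⟨⟨hn1, hn2⟩, hm1, hm2⟩, h1, h2, h3, h4⟩
          rcases lt_trichotomy (n * (b + d)) ((a + c) * m) with htri | htri | htri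
          · exact Or.inr (Or.inl ⟨⟨⟨hn1, hn2⟩, hm1, hm2⟩, h1, htri, h3, h4⟩)
          · have := pvCross_eq (show 0 < m by omega) (show 0 < b + d by omega) h3 hmedg htri
            exact Or.inl ⟨this.1, this.2⟩
          · exact Or.inr (Or.inr ⟨⟨⟨hn1, hn2⟩, hm1, hm2⟩, htri, h2, h3, h4⟩)
        · rintro (⟨rfl, rfl⟩ | ⟨⟨⟨hn1, hn2⟩, hm1, hm2⟩, h1, h2, h3, h4⟩
            | ⟨⟨⟨hn1, hn2⟩, hm1, hm2⟩, h1, h2, h3, h4⟩)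
          · exact ⟨⟨⟨by omega, by omega⟩, by omega, by omega⟩, hmed1, hmed2, hmedg, hmedlegs⟩
          · refine ⟨⟨⟨hn1, hn2⟩, hm1, hm2⟩, h1, ?_, h3, h4⟩
            exact pvFracTrans (show 0 < m by omega) (show 0 < b + d by omega)
              (show 0 < d by omega) h2 hmed2
          · refine ⟨⟨⟨hn1, hn2⟩, hm1, hm2⟩, ?_, h2, h3, h4⟩
            exact pvFracTrans (show 0 < b by omega) (show 0 < b + d by omega)
              (show 0 < m by omega) hmed1 h1
      have hnotmem : ((a + c), (b + d)) ∉
          (pvSet bound a b (a + c) (b + d) ∪ pvSet bound (a + c) (b + d) c d) := by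
        simp only [Finset.mem_union, pvSet, Finset.mem_filter, Finset.mem_product,
          Finset.mem_Icc, not_or]
        constructor
        · rintro ⟨-, -, h2, -⟩
          omega
        · rintro ⟨-, h1, -⟩
          omega
      have hdisj : Disjoint (pvSet bound a b (a + c) (b + d))
          (pvSet bound (a + c) (b + d) c d) := by
        rw [Finset.disjoint_left]
        rintro ⟨n, m⟩ hp1 hp2
        simp only [pvSet, Finset.mem_filter] at hp1 hp2
        obtain ⟨-, -, h2, -⟩ := hp1
        obtain ⟨-, h1, -⟩ := hp2
        omega
      rw [hsplit, Finset.sum_insert hnotmem, Finset.sum_union hdisj]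
      simp only [pvF, pvLegs2]
      ring

-- ---- loop side: outerB sums pvF over pvTail ----

theorem pvIcc_succ (a b : ℤ) (h : a ≤ b) : Finset.Icc a b = insert b (Finset.Icc a (b - 1)) := by
  ext x
  simp only [Finset.mem_Icc, Finset.mem_insert]
  omega

theorem list_sum_pyRange (f : ℤ → ℤ) : ∀ (k : ℕ) (a b : ℤ), (b - a).toNat = k →
    ((PySem.List.pyRange a b 1).map f).sum = ∑ n ∈ Finset.Icc a (b - 1), f n := by
  intro k
  induction k with
  | zero =>
    intro a b hk
    rw [PySem.List.pyRange_one_eq_nil (by omega)]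
    rw [Finset.Icc_eq_empty (by omega)]
    simp
  | succ k IH =>
    intro a b hk
    have hab : a ≤ b - 1 := by omega
    have : b = (b - 1) + 1 := by omega
    rw [this, PySem.List.pyRange_one_succ_right (by omega)]
    rw [List.map_append, List.sum_append]
    rw [IH a (b - 1) (by omega)]
    have h2 : (b - 1 + 1 - 1) = b - 1 := by omega
    rw [h2, pvIcc_succ a (b - 1) (by omega), Finset.sum_insert (by simp)]
    simp [add_comm]

theorem innerB_eq (bound m res : Int) (hm : 2 ≤ m) :
    innerB bound m res = res +
      ∑ n ∈ (Finset.Icc 1 (m - 1)).filter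
        (fun n => Int.gcd n m = 1 ∧ pvLegs2 n m < bound), pvF bound (n, m) := by
  unfold innerB
  rw [show (List.foldl
      (fun r n =>
        if m * m - n * n + 2 * m * n < bound ∧ PySem.Int.mod (m - n) 2 ≠ 0 ∧ gcdB n m = 1 then
          r + PySem.Int.floordiv (bound - 1) (m * m - n * n + 2 * m * n) * 2
        else r)
      res (PySem.List.pyRange 1 m 1))
    = List.foldl
      (fun r n => r + (if Int.gcd n m = 1 ∧ pvLegs2 n m < bound then pvF bound (n, m) else 0))
      res (PySem.List.pyRange 1 m 1) from
    PySem.List.foldl_congr_mem' _ _ _ _ (by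
      intro x hx acc
      have hx' : 1 ≤ x ∧ x < m := (PySem.List.mem_pyRange_one).mp hx
      rw [gcdB_eq m.natAbs x m rfl (by omega) (by omega)]
      simp only [pvF, pvLegs2, Nat.cast_eq_one]
      split_ifs <;> first | rfl | omega)]
  rw [PySem.List.foldl_add]
  rw [list_sum_pyRange _ (m - 1).toNat 1 m rfl]
  rw [Finset.sum_filter]

theorem pvSq_mono {m mm : Int} (h2 : 0 ≤ m) (h : m ≤ mm) :
    (m + 1) * (m + 1) ≤ (mm + 1) * (mm + 1) := by
  nlinarith

-- the m-th column of pvTail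
theorem pvTail_split (bound m : Int) (hm : 2 ≤ m) (hmb : m ≤ bound) :
    pvTail bound m = ((Finset.Icc 1 (m - 1)).filter
        (fun n => Int.gcd n m = 1 ∧ pvLegs2 n m < bound)).image (fun n => (n, m))
      ∪ pvTail bound (m + 1) := by
  ext p
  obtain ⟨n, mm⟩ := p
  simp only [pvTail, Finset.mem_union, Finset.mem_image, Finset.mem_filter,
    Finset.mem_product, Finset.mem_Icc, Prod.mk.injEq]
  constructor
  · rintro ⟨⟨⟨hn1, hn2⟩, hm1, hm2⟩, h1, h2, h3, h4⟩
    by_cases hcase : mm = m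
    · subst hcase
      exact Or.inl ⟨n, ⟨⟨by omega, by omega⟩, h3, h4⟩, rfl, rfl⟩
    · exact Or.inr ⟨⟨⟨by omega, by omega⟩, by omega, by omega⟩, by omega, by omega, h3, h4⟩
  · rintro (⟨x, ⟨⟨hx1, hx2⟩, h3, h4⟩, rfl, rfl⟩ | ⟨⟨⟨hn1, hn2⟩, hm1, hm2⟩, h1, h2, h3, h4⟩)
    · exact ⟨⟨⟨by omega, by omega⟩, by omega, by omega⟩, by omega, by omega, h3, h4⟩
    · exact ⟨⟨⟨by omega, by omega⟩, by omega, by omega⟩, by omega, by omega, h3, h4⟩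

theorem pvTail_empty (bound m : Int) (hm : 2 ≤ m)
    (hstop : ¬ (m + 1) * (m + 1) - 2 < bound) : pvTail bound m = ∅ := by
  ext p
  obtain ⟨n, mm⟩ := p
  simp only [pvTail, Finset.mem_filter, Finset.mem_product, Finset.mem_Icc,
    Finset.notMem_empty, iff_false]
  rintro ⟨⟨⟨hn1, hn2⟩, hm1, hm2⟩, h1, h2, h3, h4⟩
  have hrow := pvLegs2_row_ge h1 h2
  have hsq := pvSq_mono (by omega : (0:ℤ) ≤ m) hm1
  omega

theorem outerB_sum (bound : Int) : ∀ (k : ℕ) (m res : Int), 2 ≤ m →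
    (bound + 2 - (m + 1) * (m + 1)).toNat = k →
    outerB bound m res = res + (pvTail bound m).sum (pvF bound) := by
  intro k
  induction k using Nat.strong_induction_on with
  | _ k IH =>
    intro m res hm hk
    rw [outerB]
    by_cases hcont : (m + 1) * (m + 1) - 2 < bound
    · rw [dif_pos hcont]
      have key : (m + 1 + 1) * (m + 1 + 1) = (m + 1) * (m + 1) + 2 * m + 3 := by ring
      rw [IH (bound + 2 - (m + 1 + 1) * (m + 1 + 1)).toNat (by omega) (m + 1)
        (innerB bound m res) (by omega) rfl]
      rw [innerB_eq bound m res hm]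
      have hmb : m ≤ bound := by nlinarith
      rw [pvTail_split bound m hm hmb]
      have hdisj : Disjoint
          (((Finset.Icc 1 (m - 1)).filter
            (fun n => Int.gcd n m = 1 ∧ pvLegs2 n m < bound)).image (fun n => (n, m)))
          (pvTail bound (m + 1)) := by
        rw [Finset.disjoint_left]
        rintro ⟨n, mm⟩ hp1 hp2
        simp only [Finset.mem_image, Finset.mem_filter, Finset.mem_Icc, Prod.mk.injEq] at hp1
        simp only [pvTail, Finset.mem_filter, Finset.mem_product, Finset.mem_Icc] at hp2
        obtain ⟨x, _, _, h2⟩ := hp1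
        omega
      rw [Finset.sum_union hdisj]
      rw [Finset.sum_image (by intro x _ y _ hxy; simpa using congrArg Prod.fst hxy)]
      ring
    · rw [dif_neg hcont]
      rw [pvTail_empty bound m hm hcont, Finset.sum_empty, add_zero]

theorem root_sets (bound : Int) : pvSet bound 0 1 1 1 = pvTail bound 2 := by
  ext p
  obtain ⟨n, m⟩ := p
  simp only [pvSet, pvTail, Finset.mem_filter, Finset.mem_product, Finset.mem_Icc,
    zero_mul, mul_one, one_mul]
  constructor
  · rintro ⟨⟨⟨hn1, hn2⟩, hm1, hm2⟩, h1, h2, h3, h4⟩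
    exact ⟨⟨⟨by omega, by omega⟩, by omega, by omega⟩, by omega, by omega, h3, h4⟩
  · rintro ⟨⟨⟨hn1, hn2⟩, hm1, hm2⟩, h1, h2, h3, h4⟩
    exact ⟨⟨⟨by omega, by omega⟩, by omega, by omega⟩, by omega, by omega, h3, h4⟩


-- ===== VERDICT (by name: the statement is the Claim_ definition above) =====
theorem countIncenterCase_spec : Claim_equal_countIncenterCase := by
  intro bound _
  unfold Spec_countIncenterCase countIncenterCase countIncenterCase_alt
  have hA : loopA bound [⟨(0, 1, 1, 1), pvInv_root⟩] 0 = visitT bound ⟨(0, 1, 1, 1), pvInv_root⟩ := by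
    rw [loopA_eq]
    simp
  rw [hA]
  rw [visitT_sum bound (bound - pvLegs (0, 1, 1, 1)).toNat 0 1 1 1 pvInv_root rfl (by norm_num)]
  rw [outerB_sum bound (bound + 2 - (2 + 1) * (2 + 1)).toNat 2 0 (by norm_num) rfl]
  rw [root_sets]
  simp
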